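-- pv_equiv track=rewrite | github.com/Arsen1302/Code-copy-detector | TestData/solutions/problem_930_4.py | solution_930_4
-- ===== SOURCE A (Python) =====
-- from typing import List
--
-- def solution_930_4(rating: List[int]) -> int:
--     ans = 0
--     seen = [[0]*2 for _ in rating]
--     for i in range(len(rating)):
--         for ii in range(i):
--             if rating[ii] < rating[i]:
--                 ans += seen[ii][0]
--                 seen[i][0] += 1
--             elif rating[ii] > rating[i]:
--                 ans += seen[ii][1]
--                 seen[i][1] += 1
--     return ans
-- ===== SOURCE B (Python) =====
-- from typing import List
--
-- def solution_930_4(rating: List[int]) -> int: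
--     # count each monotonic triple by its middle element:
--     # (smaller on left)*(larger on right) + (larger on left)*(smaller on right)
--     n = len(rating)
--     ans = 0
--     for j in range(n):
--         rj = rating[j]
--         left = rating[:j]
--         right = rating[j + 1:]
--         ls = sum(1 for x in left if x < rj)
--         lg = sum(1 for x in left if x > rj)
--         rs = sum(1 for x in right if x < rj)
--         rg = sum(1 for x in right if x > rj)
--         ans += ls * rg + lg * rs
--     return ans
-- ===== Notes on version B (the rewrite author's own statement) =====
-- stated objective: alternative
-- what changed: B counts each monotonic triple by its middle element, (smaller-left)*(larger-right)+(larger-left)*(smaller-right) summed over positions, instead of A's dynamic-programming 'seen' table that accumulates per-prefix pair counts inside a nested index loop.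
import Mathlib
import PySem

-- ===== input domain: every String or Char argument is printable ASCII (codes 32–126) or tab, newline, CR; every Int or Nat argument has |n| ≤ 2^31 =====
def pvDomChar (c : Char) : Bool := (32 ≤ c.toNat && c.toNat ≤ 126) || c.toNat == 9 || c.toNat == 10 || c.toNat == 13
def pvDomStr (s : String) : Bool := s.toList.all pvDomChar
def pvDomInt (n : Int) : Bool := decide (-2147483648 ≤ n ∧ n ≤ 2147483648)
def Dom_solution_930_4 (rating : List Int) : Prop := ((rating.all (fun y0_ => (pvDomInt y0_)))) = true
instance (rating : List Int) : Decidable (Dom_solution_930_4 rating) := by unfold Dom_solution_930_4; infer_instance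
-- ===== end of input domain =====

-- B counts each monotonic triple by its middle element instead of A's incremental 'seen' pair-count table; same result, alternative algorithm.

-- ===== PORT A =====
def solution_930_4 (rating : List Int) : Int :=
  -- ans = 0; seen = [[0,0] for _ in rating]; nested index loops, literal transliteration
  let res :=
    (PySem.List.pyRange 0 rating.length 1).foldl (fun st i =>
      (PySem.List.pyRange 0 i 1).foldl (fun st ii =>
        let ans := st.1
        let seen := st.2
        let ri := PySem.List.pyGetD rating i 0
        let rii := PySem.List.pyGetD rating ii 0
        if rii < ri then
          let sii := PySem.List.pyGetD seen ii ((0 : Int), (0 : Int))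
          let si := PySem.List.pyGetD seen i ((0 : Int), (0 : Int))
          (ans + sii.1, seen.set i.toNat (si.1 + 1, si.2))
        else if ri < rii then
          let sii := PySem.List.pyGetD seen ii ((0 : Int), (0 : Int))
          let si := PySem.List.pyGetD seen i ((0 : Int), (0 : Int))
          (ans + sii.2, seen.set i.toNat (si.1, si.2 + 1))
        else (ans, seen)) st)
      (0, rating.map (fun _ => ((0 : Int), (0 : Int))))
  res.1

-- ===== PORT B =====
def solution_930_4_alt (rating : List Int) : Int :=
  (List.range rating.length).foldl (fun ans j =>
    let rj := rating.getD j 0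
    let left := rating.take j
    let right := rating.drop (j + 1)
    let ls : Int := left.countP (fun x => x < rj)
    let lg : Int := left.countP (fun x => rj < x)
    let rs : Int := right.countP (fun x => x < rj)
    let rg : Int := right.countP (fun x => rj < x)
    ans + (ls * rg + lg * rs)) 0

-- ===== PRECONDITION & SPEC =====
def Spec_solution_930_4 (rating : List Int) (out : Int) : Prop := out = solution_930_4_alt rating
instance (rating : List Int) (out : Int) : Decidable (Spec_solution_930_4 rating out) := by unfold Spec_solution_930_4; infer_instance

-- ===== CLAIM (what is proved, stated in full; the proofs are below) =====
def Claim_equal_solution_930_4 : Prop := ∀ (rating : List Int), Dom_solution_930_4 rating → Spec_solution_930_4 rating (solution_930_4 rating)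

-- ===== LEMMAS AND PROOFS =====

-- number of elements before j that are smaller / larger than rating[j]
def pvUp (r : List Int) (j : ℕ) : Int := ((r.take j).countP (fun x => x < r.getD j 0) : ℕ)
def pvDn (r : List Int) (j : ℕ) : Int := ((r.take j).countP (fun x => r.getD j 0 < x) : ℕ)
-- A's per-pair contribution when the outer index is i and inner index ii
def pvF (r : List Int) (ii i : ℕ) : Int :=
  if r.getD ii 0 < r.getD i 0 then pvUp r ii
  else if r.getD i 0 < r.getD ii 0 then pvDn r ii else 0
-- right-side counts restricted to the first m elements
def pvCg (r : List Int) (j m : ℕ) : Int := (((r.take m).drop (j+1)).countP (fun x => r.getD j 0 < x) : ℕ)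
def pvCl (r : List Int) (j m : ℕ) : Int := (((r.take m).drop (j+1)).countP (fun x => x < r.getD j 0) : ℕ)
-- A's running total after m outer iterations / B's total over the first m middles
def pvFsum (r : List Int) (m : ℕ) : Int :=
  ((List.range m).map (fun i => ((List.range i).map (fun ii => pvF r ii i)).sum)).sum
def pvGsum (r : List Int) (m : ℕ) : Int :=
  ((List.range m).map (fun j => pvUp r j * pvCg r j m + pvDn r j * pvCl r j m)).sum
-- A's 'seen' list after m outer iterations
def pvSeen (r : List Int) (m : ℕ) : List (Int × Int) :=
  (List.range r.length).map (fun j => if j < m then (pvUp r j, pvDn r j) else (0, 0))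
-- 'seen' in the middle of outer iteration i, after t inner iterations
def pvSeenP (r : List Int) (i t : ℕ) : List (Int × Int) :=
  (pvSeen r i).set i (((r.take t).countP (fun x => x < r.getD i 0) : ℕ),
                      ((r.take t).countP (fun x => r.getD i 0 < x) : ℕ))
-- A's inner-loop body with Nat indices (what the port's pyRange fold reduces to)
def pvStep (r : List Int) (i : ℕ) (st : Int × List (Int × Int)) (ii : ℕ) : Int × List (Int × Int) :=
  let ans := st.1
  let seen := st.2
  let ri := r.getD i 0
  let rii := r.getD ii 0
  if rii < ri then
    let sii := seen.getD ii ((0 : Int), (0 : Int))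
    let si := seen.getD i ((0 : Int), (0 : Int))
    (ans + sii.1, seen.set i (si.1 + 1, si.2))
  else if ri < rii then
    let sii := seen.getD ii ((0 : Int), (0 : Int))
    let si := seen.getD i ((0 : Int), (0 : Int))
    (ans + sii.2, seen.set i (si.1, si.2 + 1))
  else (ans, seen)

lemma pyRange0 (n : ℕ) :
    PySem.List.pyRange 0 (n : Int) 1 = (List.range n).map (fun k : ℕ => (k : Int)) := by
  rw [PySem.List.pyRange_one]
  simp only [zero_add, Int.sub_zero, Int.toNat_natCast]

lemma portA_fold (r : List Int) :
    solution_930_4 r = ((List.range r.length).foldl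
      (fun st i => (List.range i).foldl (pvStep r i) st)
      (0, r.map (fun _ => ((0 : Int), (0 : Int))))).1 := by
  unfold solution_930_4 pvStep
  simp only [pyRange0, List.foldl_map, PySem.List.pyGetD_natCast, Int.toNat_natCast]

lemma pvSeen_getD_lt (r : List Int) (m j : ℕ) (hj : j < m) (hjl : j < r.length) :
    (pvSeen r m).getD j (0,0) = (pvUp r j, pvDn r j) := by
  simp [pvSeen, List.getD_eq_getElem?_getD, hj, hjl]

lemma pvSeenP_getD_lt (r : List Int) (i t j : ℕ) (hj : j < i) (hjl : j < r.length) :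
    (pvSeenP r i t).getD j (0,0) = (pvUp r j, pvDn r j) := by
  rw [pvSeenP, List.getD_eq_getElem?_getD, List.getElem?_set_ne (by omega)]
  rw [← List.getD_eq_getElem?_getD]
  exact pvSeen_getD_lt r i j hj hjl

lemma pvSeenP_getD_self (r : List Int) (i t : ℕ) (hi : i < r.length) :
    (pvSeenP r i t).getD i (0,0) =
      ((((r.take t).countP (fun x => x < r.getD i 0) : ℕ) : Int),
       (((r.take t).countP (fun x => r.getD i 0 < x) : ℕ) : Int)) := by
  simp [pvSeenP, pvSeen, List.getD_eq_getElem?_getD, hi]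

lemma pvSeenP_zero (r : List Int) (i : ℕ) : pvSeenP r i 0 = pvSeen r i := by
  apply List.ext_getElem?
  intro j
  rw [pvSeenP, List.getElem?_set]
  by_cases h : i = j
  · subst h
    by_cases hil : i < r.length <;> simp [pvSeen, hil]
  · simp [h]

lemma pvSeenP_last (r : List Int) (i : ℕ) (hi : i < r.length) :
    pvSeenP r i i = pvSeen r (i+1) := by
  apply List.ext_getElem?
  intro j
  rw [pvSeenP, List.getElem?_set]
  by_cases h : i = j
  · subst h
    simp [pvSeen, hi, pvUp, pvDn]
  · simp only [h, if_false, pvSeen, List.getElem?_map]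
    rcases Nat.lt_or_ge j r.length with hj | hj
    · simp only [List.getElem?_range, hj, Option.map_some]
      have hiff : j < i ↔ j < i + 1 := by omega
      rw [if_congr hiff rfl rfl]
    · rw [List.getElem?_eq_none (by simpa using hj)]
      simp

lemma cnt_take_succ (r : List Int) (p : Int → Bool) (t : ℕ) (htl : t < r.length) :
    ((r.take (t+1)).countP p : Int)
      = ((r.take t).countP p : Int) + (if p (r.getD t 0) then 1 else 0) := by
  rw [List.take_succ_eq_append_getElem htl, List.countP_append, List.getD_eq_getElem r 0 htl]
  push_cast
  split_ifs with h <;> simp [h]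

lemma inner_inv (r : List Int) (i : ℕ) (hi : i < r.length) (t : ℕ) (ht : t ≤ i) (ans : Int) :
    (List.range t).foldl (pvStep r i) (ans, pvSeenP r i 0) =
      (ans + ((List.range t).map (fun ii => pvF r ii i)).sum, pvSeenP r i t) := by
  induction t with
  | zero => simp
  | succ t iht =>
    have hti : t < i := by omega
    have htl : t < r.length := by omega
    rw [List.range_succ, List.foldl_append, iht (by omega)]
    simp only [List.foldl_cons, List.foldl_nil]
    unfold pvStep
    simp only [pvSeenP_getD_lt r i t t hti htl, pvSeenP_getD_self r i t hi]
    have hset : ∀ v : Int × Int, (pvSeenP r i t).set i v = (pvSeen r i).set i v := by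
      intro v
      unfold pvSeenP
      rw [List.set_set]
    have hsum : ((List.range (t+1)).map (fun ii => pvF r ii i)).sum
        = ((List.range t).map (fun ii => pvF r ii i)).sum + pvF r t i := by
      rw [List.range_succ, List.map_append, List.sum_append]
      simp
    have hclt := cnt_take_succ r (fun x => x < r.getD i 0) t htl
    have hcgt := cnt_take_succ r (fun x => r.getD i 0 < x) t htl
    split_ifs with h1 h2
    · simp only [Prod.mk.injEq]
      constructor
      · rw [List.map_append, List.sum_append]
        simp only [List.map_cons, List.map_nil, List.sum_cons, List.sum_nil]
        rw [show pvF r t i = pvUp r t from by unfold pvF; rw [if_pos h1]]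
        ring
      · unfold pvSeenP
        rw [List.set_set, hclt, hcgt]
        simp only [decide_eq_true_eq]
        rw [if_pos h1, if_neg (lt_asymm h1), add_zero]
    · simp only [Prod.mk.injEq]
      constructor
      · rw [List.map_append, List.sum_append]
        simp only [List.map_cons, List.map_nil, List.sum_cons, List.sum_nil]
        rw [show pvF r t i = pvDn r t from by unfold pvF; rw [if_neg h1, if_pos h2]]
        ring
      · unfold pvSeenP
        rw [List.set_set, hclt, hcgt]
        simp only [decide_eq_true_eq]
        rw [if_neg h1, if_pos h2, add_zero]
    · simp only [Prod.mk.injEq]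
      constructor
      · rw [List.map_append, List.sum_append]
        simp only [List.map_cons, List.map_nil, List.sum_cons, List.sum_nil]
        rw [show pvF r t i = 0 from by unfold pvF; rw [if_neg h1, if_neg h2]]
        ring
      · unfold pvSeenP
        rw [hclt, hcgt]
        simp only [decide_eq_true_eq]
        rw [if_neg h1, if_neg h2, add_zero, add_zero]

lemma outer_inv (r : List Int) (m : ℕ) (hm : m ≤ r.length) :
    (List.range m).foldl (fun st i => (List.range i).foldl (pvStep r i) st)
      (0, r.map (fun _ => ((0 : Int), (0 : Int)))) = (pvFsum r m, pvSeen r m) := by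
  induction m with
  | zero =>
    simp only [List.range_zero, List.foldl_nil]
    have h2 : pvSeen r 0 = r.map (fun _ => ((0 : Int), (0 : Int))) := by
      unfold pvSeen
      simp [List.map_const']
    rw [h2]
    rfl
  | succ m ih =>
    have hm' : m < r.length := by omega
    rw [List.range_succ, List.foldl_append, ih (le_of_lt hm')]
    simp only [List.foldl_cons, List.foldl_nil]
    rw [← pvSeenP_zero r m, inner_inv r m hm' m le_rfl (pvFsum r m), pvSeenP_last r m hm']
    congr 1
    unfold pvFsum
    rw [List.range_succ, List.map_append, List.sum_append]
    simp

lemma pvF_eq (r : List Int) (j m : ℕ) :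
    pvF r j m = pvUp r j * (if r.getD j 0 < r.getD m 0 then 1 else 0)
              + pvDn r j * (if r.getD m 0 < r.getD j 0 then 1 else 0) := by
  unfold pvF
  split_ifs with h1 h2 h3
  · exact absurd h2 (lt_asymm h1)
  · ring
  · ring
  · ring

lemma pvCg_succ (r : List Int) (j m : ℕ) (hj : j < m) (hm : m < r.length) :
    pvCg r j (m+1) = pvCg r j m + (if r.getD j 0 < r.getD m 0 then 1 else 0) := by
  unfold pvCg
  rw [List.take_succ_eq_append_getElem hm,
      List.drop_append_of_le_length (by rw [List.length_take]; omega),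
      List.countP_append]
  rw [List.getD_eq_getElem r 0 hm]
  push_cast
  split_ifs with h <;> simp_all [List.getD_eq_getElem?_getD]

lemma pvCl_succ (r : List Int) (j m : ℕ) (hj : j < m) (hm : m < r.length) :
    pvCl r j (m+1) = pvCl r j m + (if r.getD m 0 < r.getD j 0 then 1 else 0) := by
  unfold pvCl
  rw [List.take_succ_eq_append_getElem hm,
      List.drop_append_of_le_length (by rw [List.length_take]; omega),
      List.countP_append]
  rw [List.getD_eq_getElem r 0 hm]
  push_cast
  split_ifs with h <;> simp_all [List.getD_eq_getElem?_getD]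

lemma FG (r : List Int) (m : ℕ) (hm : m ≤ r.length) : pvFsum r m = pvGsum r m := by
  induction m with
  | zero => simp [pvFsum, pvGsum]
  | succ m ih =>
    have hmlt : m < r.length := by omega
    have hrec := ih (by omega)
    have hF : pvFsum r (m+1) = pvFsum r m + ((List.range m).map (fun ii => pvF r ii m)).sum := by
      unfold pvFsum
      rw [List.range_succ, List.map_append, List.sum_append]
      simp
    have hmap : (List.range m).map
          (fun j => pvUp r j * pvCg r j (m+1) + pvDn r j * pvCl r j (m+1))
        = (List.range m).map
          (fun j => (pvUp r j * pvCg r j m + pvDn r j * pvCl r j m) + pvF r j m) := by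
      apply List.map_congr_left
      intro j hjm
      have hj : j < m := List.mem_range.mp hjm
      rw [pvCg_succ r j m hj hmlt, pvCl_succ r j m hj hmlt, pvF_eq]
      ring
    have hlast : pvUp r m * pvCg r m (m+1) + pvDn r m * pvCl r m (m+1) = 0 := by
      have h1 : ((r.take (m+1)).drop (m+1)) = [] :=
        List.drop_eq_nil_of_le (by rw [List.length_take]; omega)
      simp [pvCg, pvCl, h1]
    have hG : pvGsum r (m+1) = pvGsum r m + ((List.range m).map (fun j => pvF r j m)).sum := by
      unfold pvGsum
      rw [List.range_succ, List.map_append, List.sum_append, hmap,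
          PySem.List.sum_map_add_int]
      simp [hlast]
    rw [hF, hG, hrec]

lemma portB_eq (r : List Int) : solution_930_4_alt r = pvGsum r r.length := by
  unfold solution_930_4_alt pvGsum pvUp pvDn pvCg pvCl
  rw [PySem.List.foldl_add]
  simp [List.take_length]

-- ===== VERDICT (by name: the statement is the Claim_ definition above) =====
theorem solution_930_4_spec : Claim_equal_solution_930_4 := by
  intro r _
  unfold Spec_solution_930_4
  rw [portA_fold, outer_inv r r.length le_rfl, portB_eq, ← FG r r.length le_rfl]
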